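-- pv_equiv track=rewrite | github.com/nascarsayan/gfg | interview/08_hashing/12_uncommonChars.py | uncommonChar
-- ===== SOURCE A (Python) =====
-- from collections import defaultdict
--
-- def uncommonChar(s1, s2):
--   pre = defaultdict(int)
--   for es1 in s1:
--     pre[es1] = 1
--   for es2 in s2:
--     if pre[es2] == 1:
--       pre[es2] = -1
--     elif pre[es2] > -1:
--       pre[es2] = 2
--   ret = ''
--   for c in sorted(pre.keys()):
--     if pre[c] > 0:
--       ret += c
--   return ret
-- ===== SOURCE B (Python) =====
-- def uncommonChar(s1, s2):
--   a = sorted(set(s1))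
--   b = sorted(set(s2))
--   i = j = 0
--   out = []
--   while i < len(a) and j < len(b):
--     if a[i] < b[j]:
--       out.append(a[i]); i += 1
--     elif b[j] < a[i]:
--       out.append(b[j]); j += 1
--     else:
--       i += 1; j += 1
--   out.extend(a[i:])
--   out.extend(b[j:])
--   return ''.join(out)
-- ===== Notes on version B (the rewrite author's own statement) =====
-- stated objective: faster
-- what changed: Replaces A's defaultdict 1/-1/2 marker state machine (two marking loops plus a conditional accumulation pass over the sorted keys) with a two-pointer merge of the two sorted distinct-character lists that emits chars present in exactly one, producing the output already in sorted order; faster by avoiding the per-character dict updates and the second filtered pass.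
import Mathlib
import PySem

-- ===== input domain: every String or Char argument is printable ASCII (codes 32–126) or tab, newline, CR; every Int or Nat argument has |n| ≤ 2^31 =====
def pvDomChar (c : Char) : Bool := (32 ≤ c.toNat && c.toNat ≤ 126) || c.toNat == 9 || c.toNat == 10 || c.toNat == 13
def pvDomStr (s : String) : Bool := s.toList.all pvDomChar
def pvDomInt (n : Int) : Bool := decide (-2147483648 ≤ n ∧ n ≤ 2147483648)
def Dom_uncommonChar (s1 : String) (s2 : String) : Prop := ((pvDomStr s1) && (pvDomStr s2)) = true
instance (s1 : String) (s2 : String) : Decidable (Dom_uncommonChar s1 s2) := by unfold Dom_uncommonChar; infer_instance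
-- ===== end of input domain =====

-- B replaces A's defaultdict 1/-1/2 marker state machine with a two-pointer merge of the two
-- sorted distinct-character lists, emitting chars present in exactly one; return values proved equal.

-- ===== PORT A =====
-- body of A's second loop, split at the defaultdict read: 'pre[es2]' inserts 0 for a missing key (ucStep), then the 1/-1/2 update runs (ucStep2)
def ucStep2 (d0 : PySem.Dict Char Int) (c : Char) : PySem.Dict Char Int :=
  if d0.getD c 0 == 1 then d0.insert c (-1)
  else if d0.getD c 0 > -1 then d0.insert c 2
  else d0

def ucStep (d : PySem.Dict Char Int) (c : Char) : PySem.Dict Char Int :=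
  ucStep2 (if d.contains c then d else d.insert c 0) c

def uncommonChar (s1 : String) (s2 : String) : String :=
  let pre := s2.toList.foldl ucStep
    (s1.toList.foldl (fun d c => d.insert c 1) (PySem.Dict.empty : PySem.Dict Char Int))
  String.mk ((PySem.List.sorted pre.keys (fun x => x) false).foldl
    (fun ret c => if pre.getD c 0 > 0 then ret ++ [c] else ret) [])

-- ===== PORT B =====
-- B's while loop over indices i, j with the two trailing extends, written as the
-- equivalent recursion on the unconsumed suffixes a[i:], b[j:] (same comparisons, same output order)
def ucMerge : List Char → List Char → List Char
  | [], b => b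
  | a, [] => a
  | x :: xs, y :: ys =>
      if x < y then x :: ucMerge xs (y :: ys)
      else if y < x then y :: ucMerge (x :: xs) ys
      else ucMerge xs ys
termination_by a b => a.length + b.length
decreasing_by all_goals (simp; try omega)

def uncommonChar_alt (s1 : String) (s2 : String) : String :=
  String.mk (ucMerge
    (PySem.List.sorted (PySem.Set.ofList s1.toList) (fun x => x) false)
    (PySem.List.sorted (PySem.Set.ofList s2.toList) (fun x => x) false))

-- ===== PRECONDITION & SPEC =====
def Spec_uncommonChar (s1 : String) (s2 : String) (out : String) : Prop := out = uncommonChar_alt s1 s2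
instance (s1 : String) (s2 : String) (out : String) : Decidable (Spec_uncommonChar s1 s2 out) := by unfold Spec_uncommonChar; infer_instance

-- ===== CLAIM (what is proved, stated in full; the proofs are below) =====
def Claim_equal_uncommonChar : Prop := ∀ (s1 : String) (s2 : String), Dom_uncommonChar s1 s2 → Spec_uncommonChar s1 s2 (uncommonChar s1 s2)

-- ===== LEMMAS AND PROOFS =====

-- the value transition A's second-loop body performs on one key
def ucT (o : Option Int) : Option Int :=
  match o with
  | none => some 2
  | some v => if v = 1 then some (-1) else if v > -1 then some 2 else some v

theorem ucT_idem (o : Option Int) : ucT (ucT o) = ucT o := by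
  rcases o with _ | v
  · norm_num [ucT]
  · unfold ucT
    by_cases h1 : v = 1
    · subst h1; norm_num
    · by_cases h2 : v > -1
      · simp only [if_neg h1, if_pos h2]; norm_num
      · simp only [if_neg h1, if_neg h2]

theorem get?_ucStep (d : PySem.Dict Char Int) (x c : Char) :
    (ucStep d x).get? c = if c = x then ucT (d.get? x) else d.get? c := by
  unfold ucStep ucStep2 ucT
  rcases hc : d.get? x with _ | v
  · have hcon : d.contains x = false := by
      rw [PySem.Dict.contains_eq_isSome_get?, hc]; rfl
    rw [hcon]
    simp only [Bool.false_eq_true, if_false]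
    have h0 : (d.insert x 0).getD x 0 = 0 := by
      simp
    rw [h0]
    norm_num
    by_cases hcx : c = x
    · subst hcx; simp
    · simp [PySem.Dict.get?_insert, hcx]
  · have hcon : d.contains x = true := by
      rw [PySem.Dict.contains_eq_isSome_get?, hc]; rfl
    rw [hcon]
    simp only [if_true]
    have hv : d.getD x 0 = v := by rw [PySem.Dict.getD_eq_get?_getD, hc]; rfl
    rw [hv]
    by_cases h1 : v = 1
    · subst h1
      norm_num
      by_cases hcx : c = x
      · subst hcx; simp
      · simp [PySem.Dict.get?_insert, hcx]
    · by_cases h2 : v > -1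
      · simp only [beq_iff_eq, if_neg h1, if_pos h2]
        by_cases hcx : c = x
        · subst hcx; simp
        · simp [PySem.Dict.get?_insert, hcx]
      · simp only [beq_iff_eq, if_neg h1, if_neg h2]
        by_cases hcx : c = x
        · subst hcx; simp [hc]
        · simp [hcx]

theorem get?_loop2 (l : List Char) (d : PySem.Dict Char Int) (c : Char) :
    (l.foldl ucStep d).get? c = if c ∈ l then ucT (d.get? c) else d.get? c := by
  induction l generalizing d with
  | nil => simp
  | cons x t ih =>
    simp only [List.foldl_cons, ih, get?_ucStep, List.mem_cons]
    by_cases hcx : c = x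
    · subst hcx
      by_cases hct : c ∈ t <;> simp [hct, ucT_idem]
    · simp [hcx]

theorem get?_loop1 (l : List Char) (d : PySem.Dict Char Int) (c : Char) :
    (l.foldl (fun d c => d.insert c 1) d).get? c = if c ∈ l then some 1 else d.get? c := by
  induction l generalizing d with
  | nil => simp
  | cons x t ih =>
    simp only [List.foldl_cons, ih, List.mem_cons]
    by_cases hct : c ∈ t
    · simp [hct]
    · by_cases hcx : c = x
      · subst hcx; simp [hct]
      · simp [hct, hcx, PySem.Dict.get?_insert]

theorem nodup_keys_ucStep2 (d0 : PySem.Dict Char Int) (c : Char) (h : d0.keys.Nodup) :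
    (ucStep2 d0 c).keys.Nodup := by
  unfold ucStep2
  split
  · exact PySem.Dict.nodup_keys_insert _ _ _ h
  · split
    · exact PySem.Dict.nodup_keys_insert _ _ _ h
    · exact h

theorem nodup_keys_ucStep (d : PySem.Dict Char Int) (x : Char) (h : d.keys.Nodup) :
    (ucStep d x).keys.Nodup := by
  unfold ucStep
  apply nodup_keys_ucStep2
  split
  · exact h
  · exact PySem.Dict.nodup_keys_insert _ _ _ h

theorem nodup_keys_loop2 (l : List Char) (d : PySem.Dict Char Int) (h : d.keys.Nodup) :
    (l.foldl ucStep d).keys.Nodup := by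
  induction l generalizing d with
  | nil => exact h
  | cons x t ih => exact ih _ (nodup_keys_ucStep d x h)

-- the final dict's lookup, fully characterised by membership in the two strings
theorem get?_pre (l1 l2 : List Char) (c : Char) :
    ((l2.foldl ucStep (l1.foldl (fun d c => d.insert c 1) PySem.Dict.empty)).get? c) =
      if c ∈ l2 then (if c ∈ l1 then some (-1) else some 2)
      else (if c ∈ l1 then some 1 else none) := by
  rw [get?_loop2, get?_loop1]
  by_cases h2 : c ∈ l2 <;> by_cases h1 : c ∈ l1 <;>
    simp [h1, h2, ucT, PySem.Dict.get?_empty]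

-- the merge of two strictly sorted lists is strictly sorted and holds exactly the
-- chars in exactly one of them
theorem ucMerge_spec (a b : List Char) (ha : a.Pairwise (· < ·)) (hb : b.Pairwise (· < ·)) :
    (ucMerge a b).Pairwise (· < ·) ∧
      ∀ c, c ∈ ucMerge a b ↔ ((c ∈ a ∧ c ∉ b) ∨ (c ∈ b ∧ c ∉ a)) := by
  induction a, b using ucMerge.induct with
  | case1 b => simp [ucMerge, hb]
  | case2 a h => cases a with
    | nil => simp [ucMerge]
    | cons x xs => simp [ucMerge, ha]
  | case3 x xs y ys hxy ih =>
    obtain ⟨ihp, ihm⟩ := ih (List.Pairwise.sublist (List.sublist_cons_self x xs) ha) hb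
    have hxxs : ∀ c ∈ xs, x < c := (List.pairwise_cons.mp ha).1
    have hyys : ∀ c ∈ ys, y < c := (List.pairwise_cons.mp hb).1
    have hxb : x ∉ y :: ys := by
      intro hmem
      rcases hmem with _ | h
      · exact absurd hxy (lt_irrefl _)
      · exact absurd hxy (asymm (hyys x (by assumption)))
    constructor
    · rw [ucMerge, if_pos hxy]
      refine List.pairwise_cons.mpr ⟨?_, ihp⟩
      intro c hc
      rcases (ihm c).mp hc with ⟨h, _⟩ | ⟨h, _⟩
      · exact hxxs c h
      · rcases h with _ | h
        · exact hxy
        · exact lt_trans hxy (hyys c (by assumption))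
    · intro c
      rw [ucMerge, if_pos hxy]
      by_cases hcx : c = x
      · subst hcx
        have hcxs : c ∉ xs := fun h => absurd (hxxs c h) (lt_irrefl _)
        simp [ihm, hcxs, hxb]
      · simp [ihm, List.mem_cons, hcx]
  | case4 x xs y ys hxy hyx ih =>
    obtain ⟨ihp, ihm⟩ := ih ha (List.Pairwise.sublist (List.sublist_cons_self y ys) hb)
    have hxxs : ∀ c ∈ xs, x < c := (List.pairwise_cons.mp ha).1
    have hyys : ∀ c ∈ ys, y < c := (List.pairwise_cons.mp hb).1
    have hya : y ∉ x :: xs := by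
      intro hmem
      rcases hmem with _ | h
      · exact absurd hyx (lt_irrefl _)
      · exact absurd hyx (asymm (hxxs y (by assumption)))
    constructor
    · rw [ucMerge, if_neg hxy, if_pos hyx]
      refine List.pairwise_cons.mpr ⟨?_, ihp⟩
      intro c hc
      rcases (ihm c).mp hc with ⟨h, _⟩ | ⟨h, _⟩
      · rcases h with _ | h
        · exact hyx
        · exact lt_trans hyx (hxxs c (by assumption))
      · exact hyys c h
    · intro c
      rw [ucMerge, if_neg hxy, if_pos hyx]
      by_cases hcy : c = y
      · subst hcy
        have hcys : c ∉ ys := fun h => absurd (hyys c h) (lt_irrefl _)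
        simp [ihm, hcys, hya]
      · simp [ihm, List.mem_cons, hcy]
  | case5 x xs y ys hxy hyx ih =>
    have hxy' : x = y := le_antisymm (le_of_not_gt hyx) (le_of_not_gt hxy)
    subst hxy'
    obtain ⟨ihp, ihm⟩ := ih (List.Pairwise.sublist (List.sublist_cons_self x xs) ha)
      (List.Pairwise.sublist (List.sublist_cons_self x ys) hb)
    have hxxs : ∀ c ∈ xs, x < c := (List.pairwise_cons.mp ha).1
    have hyys : ∀ c ∈ ys, x < c := (List.pairwise_cons.mp hb).1
    refine ⟨by rw [ucMerge, if_neg hxy, if_neg hyx]; exact ihp, ?_⟩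
    intro c
    rw [ucMerge, if_neg hxy, if_neg hyx]
    by_cases hcx : c = x
    · subst hcx
      have h1 : c ∉ xs := fun h => absurd (hxxs c h) (lt_irrefl _)
      have h2 : c ∉ ys := fun h => absurd (hyys c h) (lt_irrefl _)
      simp [ihm, h1, h2]
    · simp [ihm, List.mem_cons, hcx]

theorem uncommonChar_eq (s1 s2 : String) : uncommonChar s1 s2 = uncommonChar_alt s1 s2 := by
  unfold uncommonChar uncommonChar_alt
  set l1 := s1.toList with hl1
  set l2 := s2.toList with hl2
  set pre := l2.foldl ucStep (l1.foldl (fun d c => d.insert c 1) PySem.Dict.empty) with hpre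
  show String.mk ((PySem.List.sorted pre.keys (fun x => x) false).foldl
      (fun ret c => if pre.getD c 0 > 0 then ret ++ [c] else ret) []) = _
  rw [PySem.List.foldl_append_ite_eq_filter]
  set K := PySem.List.sorted pre.keys (fun x => x) false with hK
  set F := K.filter (fun c => decide (pre.getD c 0 > 0)) with hF
  set A1 := PySem.List.sorted (PySem.Set.ofList l1) (fun x => x) false with hA1
  set A2 := PySem.List.sorted (PySem.Set.ofList l2) (fun x => x) false with hA2
  -- strict sortedness of A1, A2
  have strict : ∀ (l : List Char), (PySem.List.sorted (PySem.Set.ofList l) (fun x => x) false).Pairwise (· < ·) := by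
    intro l
    have hnd : (PySem.List.sorted (PySem.Set.ofList l) (fun x => x) false).Nodup :=
      (PySem.List.sorted_perm (PySem.Set.ofList l) (fun x => x) false).nodup_iff.mpr
        (PySem.Set.nodup_ofList l)
    have hle := PySem.List.sorted_pairwise (PySem.Set.ofList l) (fun x => x)
    exact (hle.and hnd).imp (fun h => lt_of_le_of_ne h.1 h.2)
  have hA1s : A1.Pairwise (· < ·) := strict l1
  have hA2s : A2.Pairwise (· < ·) := strict l2
  have hA1m : ∀ c, c ∈ A1 ↔ c ∈ l1 := by
    intro c; rw [hA1, PySem.List.mem_sorted, PySem.Set.mem_ofList]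
  have hA2m : ∀ c, c ∈ A2 ↔ c ∈ l2 := by
    intro c; rw [hA2, PySem.List.mem_sorted, PySem.Set.mem_ofList]
  obtain ⟨hMp, hMm⟩ := ucMerge_spec A1 A2 hA1s hA2s
  -- F: nodup, strictly sorted, membership characterised
  have hndk : pre.keys.Nodup := by
    apply nodup_keys_loop2
    have hgen : ∀ (l : List Char) (d : PySem.Dict Char Int), d.keys.Nodup →
        (l.foldl (fun d c => d.insert c 1) d).keys.Nodup := by
      intro l
      induction l with
      | nil => exact fun d h => h
      | cons x t ih => exact fun d h => ih _ (PySem.Dict.nodup_keys_insert _ _ _ h)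
    exact hgen l1 _ PySem.Dict.nodup_keys_empty
  have hKnd : K.Nodup := (PySem.List.sorted_perm pre.keys (fun x => x) false).nodup_iff.mpr hndk
  have hFnd : F.Nodup := hKnd.filter _
  have hmemF : ∀ c, c ∈ F ↔ ((c ∈ l1 ∧ c ∉ l2) ∨ (c ∈ l2 ∧ c ∉ l1)) := by
    intro c
    rw [hF, List.mem_filter]
    rw [hK, PySem.List.mem_sorted]
    rw [← PySem.Dict.contains_iff_mem_keys, PySem.Dict.contains_eq_isSome_get?,
        PySem.Dict.getD_eq_get?_getD, hpre, get?_pre]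
    by_cases h1 : c ∈ l1 <;> by_cases h2 : c ∈ l2 <;> simp [h1, h2]
  have hFlt : F.Pairwise (· < ·) := by
    have hle : K.Pairwise (fun a b : Char => a ≤ b) := PySem.List.sorted_pairwise pre.keys (fun x => x)
    have hlt : K.Pairwise (· < ·) := by
      have hne : K.Pairwise (· ≠ ·) := hKnd
      exact (hle.and hne).imp (fun h => lt_of_le_of_ne h.1 h.2)
    exact hlt.filter _
  -- F and ucMerge A1 A2 are both strictly sorted with the same members, hence equal
  have hMnd : (ucMerge A1 A2).Nodup := hMp.imp ne_of_lt
  have hmemM : ∀ c, c ∈ ucMerge A1 A2 ↔ ((c ∈ l1 ∧ c ∉ l2) ∨ (c ∈ l2 ∧ c ∉ l1)) :=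
    fun c => (hMm c).trans (or_congr (and_congr (hA1m c) (not_congr (hA2m c)))
      (and_congr (hA2m c) (not_congr (hA1m c))))
  have hperm : F.Perm (ucMerge A1 A2) := (List.perm_ext_iff_of_nodup hFnd hMnd).mpr
    (fun c => by rw [hmemF c, hmemM c])
  have : F = ucMerge A1 A2 :=
    hperm.eq_of_pairwise (fun a b _ _ h1 h2 => absurd h2 (asymm h1)) hFlt hMp
  rw [this, List.nil_append]

-- ===== VERDICT (by name: the statement is the Claim_ definition above) =====
theorem uncommonChar_spec : Claim_equal_uncommonChar := by
  intro s1 s2 _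
  exact uncommonChar_eq s1 s2
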